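-- pv_equiv track=rewrite | github.com/yangster33/BigBro | costs/timetraveler.py | yangster_no1
-- ===== SOURCE A (Python) =====
-- def yangster_no1(mylist):
--     # 输入用sorted(dict.items,key=lambda x:x[1])函数排序的list 返回排名 可并列 并列不占名次
--     mydict = {}
--     num = 1
--     last_i = 0
--     for i in mylist:
--         # 排除admin账号
--         if i[0] != 'admin':
--             # last_i!=0说明不是第循环第一次
--             if last_i != 0:
--                 if last_i[1] == i[1]:
--                     mydict[i[0]] = num
--                     last_i = i
--                 else:
--                     num += 1
--                     mydict[i[0]] = num
--                     last_i = i
--             else: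
--                 mydict[i[0]] = num
--                 last_i = i
--         else:
--             continue
--     mydict.update({'admin': 0})
--     return mydict
-- ===== SOURCE B (Python) =====
-- def yangster_no1(mylist):
--     # Two-phase: group the non-admin items into runs of equal score, then
--     # assign each run's dense rank to all of its keys.
--     items = [p for p in mylist if p[0] != 'admin']
--     runs = []
--     i, n = 0, len(items)
--     while i < n:
--         v = items[i][1]
--         j = i
--         while j < n and items[j][1] == v:
--             j += 1
--         runs.append((v, [k for k, _ in items[i:j]]))
--         i = j
--     out = {}
--     rank = 0
--     for _, keys in runs:
--         rank += 1
--         for k in keys: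
--             out[k] = rank
--     out['admin'] = 0
--     return out
-- ===== Notes on version B (the rewrite author's own statement) =====
-- stated objective: alternative
-- what changed: Replaces the single stateful loop (tracking num and last_i and inserting as it goes) by a two-phase decomposition: filter out admin, group the remaining items into consecutive runs of equal score, then assign each run's 1-based index as the rank of all its keys.
import Mathlib
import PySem

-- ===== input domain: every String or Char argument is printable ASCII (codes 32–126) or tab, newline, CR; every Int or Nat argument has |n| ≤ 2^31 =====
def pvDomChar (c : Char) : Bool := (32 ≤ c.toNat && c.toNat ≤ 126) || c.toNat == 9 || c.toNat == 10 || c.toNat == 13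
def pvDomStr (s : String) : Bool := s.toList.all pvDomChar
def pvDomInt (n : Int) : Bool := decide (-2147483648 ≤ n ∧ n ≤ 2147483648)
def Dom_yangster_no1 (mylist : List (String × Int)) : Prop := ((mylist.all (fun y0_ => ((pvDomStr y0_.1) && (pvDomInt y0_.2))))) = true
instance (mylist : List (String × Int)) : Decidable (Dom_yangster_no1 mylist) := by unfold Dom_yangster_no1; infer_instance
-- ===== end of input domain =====

-- B groups the non-admin items into runs of equal score and ranks run-by-run; A keeps a running
-- rank and last-item state in one loop. Equivalence is about the returned dict (no mutation).

-- ===== PORT A =====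
-- one loop step of A's for-loop; state = (mydict, num, last_i) with last_i = none for the initial 0
def yangsterStepA (s : PySem.Dict String Int × Int × Option (String × Int)) (i : String × Int) :
    PySem.Dict String Int × Int × Option (String × Int) :=
  if i.1 != "admin" then
    match s.2.2 with
    | some l =>
      if l.2 = i.2 then (s.1.insert i.1 s.2.1, s.2.1, some i)
      else (s.1.insert i.1 (s.2.1 + 1), s.2.1 + 1, some i)
    | none => (s.1.insert i.1 s.2.1, s.2.1, some i)
  else s

def yangster_no1 (mylist : List (String × Int)) : List (String × Int) :=
  let fin := mylist.foldl yangsterStepA (PySem.Dict.empty, 1, none)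
  (fin.1.insert "admin" 0).items

-- ===== PORT B =====
-- the while-loop pair of Source B: split a list into maximal runs of equal score, keeping the keys
def yangsterRuns : List (String × Int) → List (Int × List String)
  | [] => []
  | (k, v) :: t =>
    (v, k :: (t.takeWhile (fun p => p.2 == v)).map Prod.fst) ::
      yangsterRuns (t.dropWhile (fun p => p.2 == v))
termination_by l => l.length
decreasing_by simpa using Nat.lt_succ_of_le (List.length_dropWhile_le _ _)

def yangster_no1_alt (mylist : List (String × Int)) : List (String × Int) :=
  let items := mylist.filter (fun p => p.1 != "admin")
  let runs := yangsterRuns items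
  let fin := runs.foldl
    (fun (s : PySem.Dict String Int × Int) run =>
      (run.2.foldl (fun d k => d.insert k (s.2 + 1)) s.1, s.2 + 1))
    (PySem.Dict.empty, 0)
  (fin.1.insert "admin" 0).items

-- ===== PRECONDITION & SPEC =====
def Spec_yangster_no1 (mylist : List (String × Int)) (out : List (String × Int)) : Prop := out = yangster_no1_alt mylist
instance (mylist : List (String × Int)) (out : List (String × Int)) : Decidable (Spec_yangster_no1 mylist out) := by unfold Spec_yangster_no1; infer_instance

-- ===== CLAIM (what is proved, stated in full; the proofs are below) =====
def Claim_equal_yangster_no1 : Prop := ∀ (mylist : List (String × Int)), Dom_yangster_no1 mylist → Spec_yangster_no1 mylist (yangster_no1 mylist)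

-- ===== LEMMAS AND PROOFS =====

-- the (key, rank) insertion sequence A's loop performs, as a list
def pairsA : List (String × Int) → Int → Option Int → List (String × Int)
  | [], _, _ => []
  | (k, v) :: t, num, none => (k, num) :: pairsA t num (some v)
  | (k, v) :: t, num, some lv =>
    if lv = v then (k, num) :: pairsA t num (some v)
    else (k, num + 1) :: pairsA t (num + 1) (some v)

-- the (key, rank) insertion sequence B performs: each run's keys at its rank
def flattenRanks : List (Int × List String) → Int → List (String × Int)
  | [], _ => []
  | (_, keys) :: rs, r => keys.map (fun k => (k, r)) ++ flattenRanks rs (r + 1)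

theorem foldl_stepA_skips_admin (l : List (String × Int))
    (s : PySem.Dict String Int × Int × Option (String × Int)) :
    l.foldl yangsterStepA s = (l.filter (fun p => p.1 != "admin")).foldl yangsterStepA s := by
  induction l generalizing s with
  | nil => rfl
  | cons h t ih =>
    by_cases hk : (h.1 != "admin") = true
    · simp only [List.foldl_cons, List.filter_cons, hk, if_pos]
      exact ih _
    · have hstep : yangsterStepA s h = s := by simp [yangsterStepA, hk]
      simp only [List.foldl_cons, List.filter_cons, hk, if_neg, hstep, Bool.false_eq_true,
        not_false_eq_true]
      exact ih _

theorem foldl_stepA_eq_pairsA (items : List (String × Int))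
    (d : PySem.Dict String Int) (num : Int) (last : Option (String × Int))
    (hitems : ∀ p ∈ items, (p.1 != "admin") = true) :
    (items.foldl yangsterStepA (d, num, last)).1 =
      (pairsA items num (last.map Prod.snd)).foldl (fun d p => d.insert p.1 p.2) d := by
  induction items generalizing d num last with
  | nil => rfl
  | cons h t ih =>
    have hh : (h.1 != "admin") = true := hitems h (by simp)
    have ht : ∀ p ∈ t, (p.1 != "admin") = true := fun p hp => hitems p (by simp [hp])
    obtain ⟨k, v⟩ := h
    cases last with
    | none =>
      simp only [List.foldl_cons, yangsterStepA, hh, if_pos, Option.map_none, pairsA]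
      exact ih _ _ _ ht
    | some l =>
      by_cases hv : l.2 = v
      · simp only [List.foldl_cons, yangsterStepA, hh, if_pos, hv, Option.map_some, pairsA,
          if_pos, List.foldl_cons]
        exact ih _ _ _ ht
      · simp only [List.foldl_cons, yangsterStepA, hh, if_pos, hv, Option.map_some, pairsA,
          List.foldl_cons, ite_false]
        exact ih _ _ _ ht

theorem pairsA_some (t : List (String × Int)) (num : Int) (v : Int) :
    pairsA t num (some v) =
      (t.takeWhile (fun p => p.2 == v)).map (fun p => (p.1, num)) ++
        flattenRanks (yangsterRuns (t.dropWhile (fun p => p.2 == v))) (num + 1) := by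
  induction t generalizing num v with
  | nil => simp [pairsA, yangsterRuns, flattenRanks]
  | cons h t ih =>
    obtain ⟨k', v'⟩ := h
    by_cases hv : v = v'
    · subst hv
      simp only [pairsA, List.takeWhile_cons, List.dropWhile_cons, beq_self_eq_true,
        if_pos, List.map_cons]
      rw [ih, List.cons_append]
    · have hb : (v' == v) = false := by
        simp only [beq_eq_false_iff_ne]
        exact fun h => hv h.symm
      simp only [pairsA, if_neg hv, List.takeWhile_cons, List.dropWhile_cons, hb,
        Bool.false_eq_true, List.map_nil, List.nil_append, ite_false]
      rw [yangsterRuns]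
      simp only [flattenRanks, List.map_cons, List.map_map]
      rw [ih]
      simp [Function.comp]

theorem pairsA_none (items : List (String × Int)) (num : Int) :
    pairsA items num none = flattenRanks (yangsterRuns items) num := by
  cases items with
  | nil => simp [pairsA, yangsterRuns, flattenRanks]
  | cons h t =>
    obtain ⟨k, v⟩ := h
    simp only [pairsA, yangsterRuns, flattenRanks, List.map_cons, List.map_map]
    rw [pairsA_some]
    simp

theorem foldl_stepB_eq_flattenRanks (runs : List (Int × List String))
    (d : PySem.Dict String Int) (r : Int) :
    (runs.foldl
      (fun (s : PySem.Dict String Int × Int) run =>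
        (run.2.foldl (fun d k => d.insert k (s.2 + 1)) s.1, s.2 + 1)) (d, r)).1 =
      (flattenRanks runs (r + 1)).foldl (fun d p => d.insert p.1 p.2) d := by
  induction runs generalizing d r with
  | nil => rfl
  | cons h t ih =>
    obtain ⟨v, keys⟩ := h
    simp only [List.foldl_cons, flattenRanks, List.foldl_append]
    rw [ih, List.foldl_map]

-- ===== VERDICT (by name: the statement is the Claim_ definition above) =====
theorem yangster_no1_spec : Claim_equal_yangster_no1 := by
  intro mylist _
  have hA : (mylist.foldl yangsterStepA ((PySem.Dict.empty : PySem.Dict String Int), 1, none)) =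
      ((mylist.filter (fun p => p.1 != "admin")).foldl yangsterStepA (PySem.Dict.empty, 1, none)) :=
    foldl_stepA_skips_admin mylist _
  have hP := foldl_stepA_eq_pairsA (mylist.filter (fun p => p.1 != "admin")) PySem.Dict.empty 1
    none (fun p hp => (List.mem_filter.1 hp).2)
  unfold Spec_yangster_no1 yangster_no1 yangster_no1_alt
  simp only [hA, foldl_stepB_eq_flattenRanks]
  norm_num
  rw [hP]
  simp [pairsA_none]
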